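-- pv_equiv track=rewrite | github.com/jaeml06/Codeing-Test | 프로그래머스/0/120864. 숨어있는 숫자의 덧셈 （2）/숨어있는 숫자의 덧셈 （2）.py | solution
-- ===== SOURCE A (Python) =====
-- def solution(my_string):
--     temp = ''
--     answer = 0
--     for v in my_string:
--         if v.isnumeric():
--             temp += v
--         else:
--             if temp != '':
--                 answer += int(temp)
--                 temp = ''
--     if temp != '':
--         answer += int(temp)
--     return answer
-- ===== SOURCE B (Python) =====
-- def solution(my_string):
--     cleaned = ''.join(c if c.isnumeric() else ' ' for c in my_string)
--     return sum(int(t) for t in cleaned.split())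
-- ===== Notes on version B (the rewrite author's own statement) =====
-- stated objective: idiomatic
-- what changed: Replaces the manual temp-buffer scan with its trailing flush branch by mapping non-numeric characters to spaces and summing int() over str.split(), removing all explicit state.
import Mathlib
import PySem

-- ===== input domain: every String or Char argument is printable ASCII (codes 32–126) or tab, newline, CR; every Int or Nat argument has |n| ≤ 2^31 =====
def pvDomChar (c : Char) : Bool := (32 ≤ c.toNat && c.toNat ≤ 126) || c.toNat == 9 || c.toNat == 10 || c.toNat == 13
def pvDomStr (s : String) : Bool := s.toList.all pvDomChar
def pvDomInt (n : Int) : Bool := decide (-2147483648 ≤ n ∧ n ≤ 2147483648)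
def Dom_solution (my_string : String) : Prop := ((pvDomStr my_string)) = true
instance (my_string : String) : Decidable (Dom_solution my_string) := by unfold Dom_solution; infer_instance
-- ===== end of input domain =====

-- B replaces A's manual temp buffer and trailing flush by mapping non-numeric chars to
-- spaces and summing int() over str.split() (idiomatic; same cost).
-- Note: Python's str.isnumeric is ported as PySem.Chars.isdigit, exact on the printable-ASCII
-- domain Dom_solution; int(temp) is ported as (PySem.Int.ofChars? …).getD 0, exact because every
-- piece int() is applied to is a nonempty run of ASCII digits.


-- ===== PORT A =====
def solution (my_string : String) : Int :=
  let p := my_string.toList.foldl (fun (st : List Char × Int) v =>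
    if PySem.Chars.isdigit v then (st.1 ++ [v], st.2)
    else if st.1 ≠ [] then ([], st.2 + (PySem.Int.ofChars? st.1).getD 0)
    else st) ([], 0)
  if p.1 ≠ [] then p.2 + (PySem.Int.ofChars? p.1).getD 0 else p.2

-- ===== PORT B =====
def solution_alt (my_string : String) : Int :=
  let cleaned := my_string.toList.map (fun c => if PySem.Chars.isdigit c then c else ' ')
  ((PySem.Chars.split₀ cleaned).map (fun t => (PySem.Int.ofChars? t).getD 0)).sum

-- ===== PRECONDITION & SPEC =====
def Spec_solution (my_string : String) (out : Int) : Prop := out = solution_alt my_string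
instance (my_string : String) (out : Int) : Decidable (Spec_solution my_string out) := by unfold Spec_solution; infer_instance

-- ===== CLAIM (what is proved, stated in full; the proofs are below) =====
def Claim_equal_solution : Prop := ∀ (my_string : String), Dom_solution my_string → Spec_solution my_string (solution my_string)

-- ===== LEMMAS AND PROOFS =====

-- abbreviations used only by the proofs
def pvStep (st : List Char × Int) (v : Char) : List Char × Int :=
  if PySem.Chars.isdigit v then (st.1 ++ [v], st.2)
  else if st.1 ≠ [] then ([], st.2 + (PySem.Int.ofChars? st.1).getD 0)
  else st

def pvIntD (t : List Char) : Int := (PySem.Int.ofChars? t).getD 0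

def pvSum (ps : List (List Char)) : Int := (ps.map pvIntD).sum

theorem pvSum_reverse (ps : List (List Char)) : pvSum ps.reverse = pvSum ps := by
  simp [pvSum]

theorem isspace_of_digit (c : Char) (h : PySem.Chars.isdigit c = true) :
    PySem.Chars.isspace c = false := by
  simp [PySem.Chars.isdigit] at h
  have h1 : 48 ≤ c.toNat := h.1
  have h2 : c.toNat ≤ 57 := h.2
  simp [PySem.Chars.isspace]
  omega

theorem pv_main (cs : List Char) : ∀ (t : List Char) (ans : Int) (acc : List (List Char)),
    (let p := cs.foldl pvStep (t, ans);
     if p.1 ≠ [] then p.2 + pvIntD p.1 else p.2) + pvSum acc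
    = ans + pvSum (PySem.Chars.split₀.go
        (cs.map (fun c => if PySem.Chars.isdigit c then c else ' ')) t.reverse acc) := by
  induction cs with
  | nil =>
    intro t ans acc
    simp only [List.foldl_nil, List.map_nil, PySem.Chars.split₀.go]
    by_cases ht : t = []
    · simp [ht, pvSum_reverse]
    · simp [ht, List.isEmpty_iff, pvSum]
      ring
  | cons c cs ih =>
    intro t ans acc
    simp only [List.foldl_cons, List.map_cons]
    by_cases hd : PySem.Chars.isdigit c = true
    · rw [show PySem.Chars.split₀.go ((if PySem.Chars.isdigit c then c else ' ') :: _) t.reverse acc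
          = PySem.Chars.split₀.go (cs.map (fun c => if PySem.Chars.isdigit c then c else ' '))
              (c :: t.reverse) acc by
        simp [hd, PySem.Chars.split₀.go, isspace_of_digit c hd]]
      have : c :: t.reverse = (t ++ [c]).reverse := by simp
      rw [this]
      have hstep : pvStep (t, ans) c = (t ++ [c], ans) := by simp [pvStep, hd]
      rw [hstep, ih]
    · have hsp : PySem.Chars.isspace ' ' = true := by decide
      by_cases ht : t = []
      · rw [show PySem.Chars.split₀.go ((if PySem.Chars.isdigit c then c else ' ') :: _) t.reverse acc
            = PySem.Chars.split₀.go (cs.map (fun c => if PySem.Chars.isdigit c then c else ' '))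
                [] acc by
          simp [hd, ht, PySem.Chars.split₀.go, hsp]]
        have hstep : pvStep (t, ans) c = (t, ans) := by simp [pvStep, hd, ht]
        rw [hstep, ht]
        exact ih [] ans acc
      · rw [show PySem.Chars.split₀.go ((if PySem.Chars.isdigit c then c else ' ') :: _) t.reverse acc
            = PySem.Chars.split₀.go (cs.map (fun c => if PySem.Chars.isdigit c then c else ' '))
                [] (t :: acc) by
          simp [hd, ht, PySem.Chars.split₀.go, hsp, List.isEmpty_iff]]
        have hstep : pvStep (t, ans) c = ([], ans + pvIntD t) := by simp [pvStep, hd, ht, pvIntD]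
        rw [hstep]
        have := ih [] (ans + pvIntD t) (t :: acc)
        simp only [List.reverse_nil] at this ⊢
        have hsum : pvSum (t :: acc) = pvIntD t + pvSum acc := by simp [pvSum]
        rw [hsum] at this
        linarith

-- ===== VERDICT (by name: the statement is the Claim_ definition above) =====
theorem solution_spec : Claim_equal_solution := by
  intro s _
  unfold Spec_solution solution solution_alt PySem.Chars.split₀
  have h := pv_main s.toList [] 0 []
  simp only [List.reverse_nil, pvSum, List.map_nil, List.sum_nil, add_zero, zero_add, pvIntD] at h
  exact h
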